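-- pv_equiv track=rewrite | github.com/YahyaMuayyiduddin/FIT3155 | W1/gusfield_z.py | question_7
-- ===== SOURCE A (Python) =====
-- def gusfield_z(string: str) -> list[int]:
--     output = [0] * len(string)
--     l = 0
--     r = 0
--     output[0] = len(string)
--     if len(string) < 2: return output
--     k = 1
--     i = 1
--     while k < len(string) and string[k] == string[k-1]:
--         output[1] += 1
--         k += 1
--     if output[1] > 0:
--         l = 1
--         r = output[1]
--     i += 1
--     while i < len(string):
--         if i > r:
--             k = i
--             while k < len(string) and string[k] == string[k-i]:
--                 output[i] += 1
--                 k += 1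
--             if output[i] > 0:
--                 r = output[i] - 1 + i
--                 l = i
--             i += 1
--         # i is contained within an existing z box
--         else:
--             if output[i-l] < r-i:
--                 output[i] = output[i-l]
--             else:
--                 k = r + 1
--                 while k < len(string) and string[k] == string[k-i]:
--                     output[i] += 1
--                     k += 1
--                 output[i] += r-i + 1
--                 l = i
--                 r = output[i] - 1 + i
--             i += 1
--     return output
--
-- def question_7(T: str, S: str):
--     concat = T + "$" + S
--     z_array = gusfield_z(concat)
--     mx = 0
--     for i in range(len(T) + 1, len(concat)):
--         if z_array[i] + i == len(concat):
--             mx = max(mx, z_array[i])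
--     return mx
-- ===== SOURCE B (Python) =====
-- def question_7(T: str, S: str):
--     s = T + "$" + S
--     n = len(s)
--
--     def ext(i, k):
--         c = 0
--         while k + c < n and s[k + c] == s[k + c - i]:
--             c += 1
--         return c
--
--     z = [n]
--     while len(z) < n:
--         i = len(z)
--         r = l = 0
--         for j in range(1, i):
--             if z[j] > 0 and j + z[j] - 1 >= r:
--                 r, l = j + z[j] - 1, j
--         if r < i:
--             v = ext(i, i)
--         elif z[i - l] < r - i:
--             v = z[i - l]
--         else:
--             v = r - i + 1 + ext(i, r + 1)
--         z.append(v)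
--     for i in range(len(T) + 1, n):
--         if z[i] + i == n:
--             return n - i
--     return 0
-- ===== Notes on version B (the rewrite author's own statement) =====
-- stated objective: alternative
-- what changed: A threads a mutable Z-box (l, r) through its loop with three distinct update rules plus a special-cased i=1 preamble over a preallocated array; B re-derives the box at every index directly from the already-computed prefix of the Z table (furthest box end, rightmost start on ties), grows the table by append with one uniform loop body, and replaces the final max-accumulating scan by a first-hit early-return scan (valid since a hit at index i has value n-i, strictly decreasing in i). …
import Mathlib
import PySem

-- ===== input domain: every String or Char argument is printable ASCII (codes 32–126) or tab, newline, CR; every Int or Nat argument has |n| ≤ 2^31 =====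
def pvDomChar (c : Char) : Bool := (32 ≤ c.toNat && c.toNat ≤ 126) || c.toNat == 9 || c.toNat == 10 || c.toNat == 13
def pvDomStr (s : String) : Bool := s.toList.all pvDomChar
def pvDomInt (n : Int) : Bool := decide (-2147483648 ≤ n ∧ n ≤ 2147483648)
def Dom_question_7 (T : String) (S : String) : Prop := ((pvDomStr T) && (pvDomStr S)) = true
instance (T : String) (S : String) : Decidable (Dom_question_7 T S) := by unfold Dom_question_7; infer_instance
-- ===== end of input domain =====

-- B reproduces A's exact (quirky) Z-table values but with a different state organisation:
-- instead of threading mutable l/r box state through the loop with three distinct update rules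
-- and a special-cased i=1 preamble over a preallocated array, B re-derives the box at every
-- index directly from the already-computed prefix of the table (furthest box end, rightmost
-- start on ties), grows the table by append, and replaces the final max-accumulating scan by a
-- first-hit early-return scan.  (Loops are ported with a structural fuel counter that is always
-- large enough for the loop's bound check, so behaviour is unchanged.)

-- ===== PORT A =====
-- the repeated inline `while k < len(string) and string[k] == string[k-i]: output[i] += 1; k += 1`
-- fuel ≥ len(string) - k at every call site
def azExt (s : List Char) (i : ℕ) : ℕ → ℕ → ℕ → ℕ
  | 0, _, cnt => cnt
  | fuel + 1, k, cnt =>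
    if k < s.length ∧ s.getD k ' ' = s.getD (k - i) ' ' then azExt s i fuel (k + 1) (cnt + 1)
    else cnt

-- the main `while i < len(string)` loop of gusfield_z, state (output, l, r, i); fuel ≥ len - i
def agzLoop (s : List Char) : ℕ → List ℕ → ℕ → ℕ → ℕ → List ℕ
  | 0, out, _, _, _ => out
  | fuel + 1, out, l, r, i =>
    if i < s.length then
      if r < i then
        let z := azExt s i (s.length - i) i 0
        let out' := out.set i z
        if z > 0 then agzLoop s fuel out' i (z - 1 + i) (i + 1)
        else agzLoop s fuel out' l r (i + 1)
      else
        if out.getD (i - l) 0 < r - i then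
          agzLoop s fuel (out.set i (out.getD (i - l) 0)) l r (i + 1)
        else
          let z := azExt s i (s.length - (r + 1)) (r + 1) 0 + (r - i + 1)
          agzLoop s fuel (out.set i z) i (z - 1 + i) (i + 1)
    else out

def agz (s : List Char) : List ℕ :=
  let n := s.length
  let out := (List.replicate n 0).set 0 n
  if n < 2 then out
  else
    -- the special i = 1 block
    let z1 := azExt s 1 (n - 1) 1 0
    let out := out.set 1 z1
    if z1 > 0 then agzLoop s n out 1 z1 2
    else agzLoop s n out 0 0 2

def question_7 (T : String) (S : String) : Int :=
  let concat := T.toList ++ '$' :: S.toList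
  let n := concat.length
  let z := agz concat
  let mx := (List.range' (T.toList.length + 1) (n - (T.toList.length + 1))).foldl
    (fun mx i => if z.getD i 0 + i = n then max mx (z.getD i 0) else mx) 0
  (mx : Int)

-- ===== PORT B =====
-- Source B's ext(i, k): count c with s[k+c] == s[k+c-i] while k+c < n; fuel ≥ len - (k+c)
def bExt (s : List Char) (i k : ℕ) : ℕ → ℕ → ℕ
  | 0, c => c
  | fuel + 1, c =>
    if k + c < s.length ∧ s.getD (k + c) ' ' = s.getD (k + c - i) ' ' then bExt s i k fuel (c + 1)
    else c

-- Source B's inner `for j in range(1, i)` deriving the current box (r, l) from the z prefix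
def bBox (z : List ℕ) (i : ℕ) : ℕ × ℕ :=
  (List.range' 1 (i - 1)).foldl
    (fun rl j => if 0 < z.getD j 0 ∧ rl.1 ≤ j + z.getD j 0 - 1 then (j + z.getD j 0 - 1, j) else rl)
    (0, 0)

-- Source B's `while len(z) < n` loop growing z by append; fuel ≥ len - len(z)
def bMain (s : List Char) : ℕ → List ℕ → List ℕ
  | 0, z => z
  | fuel + 1, z =>
    if z.length < s.length then
      bMain s fuel (z ++ [if (bBox z z.length).1 < z.length then
          bExt s z.length z.length (s.length - z.length) 0
        else if z.getD (z.length - (bBox z z.length).2) 0 < (bBox z z.length).1 - z.length then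
          z.getD (z.length - (bBox z z.length).2) 0
        else (bBox z z.length).1 - z.length + 1
          + bExt s z.length ((bBox z z.length).1 + 1) (s.length - ((bBox z z.length).1 + 1)) 0])
    else z

-- Source B's early-return scan `for i in range(len(T)+1, n): if z[i] + i == n: return n - i`
def bScan (z : List ℕ) (n : ℕ) : ℕ → ℕ → ℕ
  | 0, _ => 0
  | fuel + 1, i =>
    if i < n then
      if z.getD i 0 + i = n then n - i else bScan z n fuel (i + 1)
    else 0

def question_7_alt (T : String) (S : String) : Int :=
  let s := T.toList ++ '$' :: S.toList
  let n := s.length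
  let z := bMain s n [n]
  (bScan z n n (T.toList.length + 1) : Int)

-- ===== PRECONDITION & SPEC =====
def Spec_question_7 (T : String) (S : String) (out : Int) : Prop := out = question_7_alt T S
instance (T : String) (S : String) (out : Int) : Decidable (Spec_question_7 T S out) := by unfold Spec_question_7; infer_instance

-- ===== CLAIM (what is proved, stated in full; the proofs are below) =====
def Claim_equal_question_7 : Prop := ∀ (T : String) (S : String), Dom_question_7 T S → Spec_question_7 T S (question_7 T S)

-- ===== LEMMAS AND PROOFS =====

lemma bExt_eq_azExt (s : List Char) : ∀ fuel i k c, bExt s i k fuel c = azExt s i fuel (k + c) c := by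
  intro fuel
  induction fuel with
  | zero => intro i k c; rfl
  | succ fuel ih =>
    intro i k c
    show (if k + c < s.length ∧ s.getD (k + c) ' ' = s.getD (k + c - i) ' '
        then bExt s i k fuel (c + 1) else c)
      = (if k + c < s.length ∧ s.getD (k + c) ' ' = s.getD (k + c - i) ' '
        then azExt s i fuel (k + c + 1) (c + 1) else c)
    by_cases h : k + c < s.length ∧ s.getD (k + c) ' ' = s.getD (k + c - i) ' '
    · rw [if_pos h, if_pos h, ih i k (c + 1), show k + (c + 1) = k + c + 1 from by omega]
    · rw [if_neg h, if_neg h]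

lemma getD_replicate_zero : ∀ (m j : ℕ), (List.replicate m (0:ℕ)).getD j 0 = 0 := by
  intro m
  induction m with
  | zero => intro j; rfl
  | succ m ih =>
    intro j
    cases j with
    | zero => rfl
    | succ j =>
      simp only [List.replicate_succ, List.getD_cons_succ]
      exact ih j

lemma pad_getD (zb : List ℕ) (m j : ℕ) :
    (zb ++ List.replicate m (0:ℕ)).getD j 0 = zb.getD j 0 := by
  by_cases hj : j < zb.length
  · exact List.getD_append _ _ _ _ hj
  · have h1 : zb.getD j 0 = 0 := List.getD_eq_default _ _ (by omega)
    have h2 : (zb ++ List.replicate m (0:ℕ)).getD j 0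
        = (List.replicate m (0:ℕ)).getD (j - zb.length) 0 := by
      simp only [List.getD, List.getElem?_append_right (show zb.length ≤ j by omega)]
    rw [h1, h2, getD_replicate_zero]

lemma pad_set (zb : List ℕ) (n v : ℕ) (hn : zb.length < n) :
    (zb ++ List.replicate (n - zb.length) (0:ℕ)).set zb.length v
      = (zb ++ [v]) ++ List.replicate (n - (zb.length + 1)) (0:ℕ) := by
  rw [List.set_append, if_neg (by omega)]
  have h1 : n - zb.length = (n - (zb.length + 1)) + 1 := by omega
  rw [h1, List.replicate_succ]
  simp

lemma append_getD (zb : List ℕ) (v j : ℕ) (hj : j < zb.length) :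
    (zb ++ [v]).getD j 0 = zb.getD j 0 :=
  List.getD_append _ _ _ _ hj

lemma append_getD_last (zb : List ℕ) (v : ℕ) :
    (zb ++ [v]).getD zb.length 0 = v := by
  rw [List.getD_append_right _ _ _ _ le_rfl]
  simp

-- the bBox fold only reads entries j with j < i
lemma bBox_congr (z1 z2 : List ℕ) (i : ℕ) (h : ∀ j, j < i → z1.getD j 0 = z2.getD j 0) :
    bBox z1 i = bBox z2 i := by
  unfold bBox
  have : ∀ (L : List ℕ), (∀ j ∈ L, j < i) → ∀ init : ℕ × ℕ,
      L.foldl (fun rl j => if 0 < z1.getD j 0 ∧ rl.1 ≤ j + z1.getD j 0 - 1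
          then (j + z1.getD j 0 - 1, j) else rl) init
        = L.foldl (fun rl j => if 0 < z2.getD j 0 ∧ rl.1 ≤ j + z2.getD j 0 - 1
          then (j + z2.getD j 0 - 1, j) else rl) init := by
    intro L
    induction L with
    | nil => intro _ _; rfl
    | cons a L ih =>
      intro hm init
      rw [List.foldl_cons, List.foldl_cons, h a (hm a List.mem_cons_self),
        ih (fun j hj => hm j (List.mem_cons_of_mem a hj))]
  refine this _ (fun j hj => ?_) _
  have := List.mem_range'_1.mp hj
  omega

lemma bBox_succ (z : List ℕ) (i : ℕ) (hi : 1 ≤ i) :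
    bBox z (i + 1) = (if 0 < z.getD i 0 ∧ (bBox z i).1 ≤ i + z.getD i 0 - 1
      then (i + z.getD i 0 - 1, i) else bBox z i) := by
  unfold bBox
  have h1 : i + 1 - 1 = (i - 1) + 1 := by omega
  rw [h1, List.range'_concat]
  rw [List.foldl_append, List.foldl_cons, List.foldl_nil]
  have e : 1 + 1 * (i - 1) = i := by omega
  rw [e]

-- the loop's fuel is irrelevant once it covers the remaining iterations
lemma agzLoop_congr (s : List Char) : ∀ f1 f2 out l r i, s.length ≤ i + f1 → s.length ≤ i + f2 →
    agzLoop s f1 out l r i = agzLoop s f2 out l r i := by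
  intro f1
  induction f1 with
  | zero =>
    intro f2 out l r i h1 h2
    cases f2 with
    | zero => rfl
    | succ f2 => rw [agzLoop, agzLoop, if_neg (by omega)]
  | succ f1 ih =>
    intro f2 out l r i h1 h2
    cases f2 with
    | zero => rw [agzLoop, agzLoop, if_neg (by omega)]
    | succ f2 =>
      rw [agzLoop, agzLoop]
      by_cases hi : i < s.length
      · rw [if_pos hi, if_pos hi]
        by_cases hr : r < i
        · rw [if_pos hr, if_pos hr]
          by_cases hz : azExt s i (s.length - i) i 0 > 0
          · rw [if_pos hz, if_pos hz, ih f2 _ _ _ _ (by omega) (by omega)]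
          · rw [if_neg hz, if_neg hz, ih f2 _ _ _ _ (by omega) (by omega)]
        · rw [if_neg hr, if_neg hr]
          by_cases hc : out.getD (i - l) 0 < r - i
          · rw [if_pos hc, if_pos hc, ih f2 _ _ _ _ (by omega) (by omega)]
          · rw [if_neg hc, if_neg hc, ih f2 _ _ _ _ (by omega) (by omega)]
      · rw [if_neg hi, if_neg hi]

-- main loop equivalence: A's (out, l, r, i) state vs B's growing table with derived box
lemma main_eq (s : List Char) : ∀ fuel (zb : List ℕ) l r, s.length ≤ zb.length + fuel →
    1 ≤ zb.length → bBox zb zb.length = (r, l) →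
    agzLoop s fuel (zb ++ List.replicate (s.length - zb.length) 0) l r zb.length
      = bMain s fuel zb := by
  intro fuel
  induction fuel with
  | zero =>
    intro zb l r hf h1 hbox
    show zb ++ List.replicate (s.length - zb.length) 0 = zb
    have : s.length - zb.length = 0 := by omega
    simp [this]
  | succ fuel ih =>
    intro zb l r hf h1 hbox
    rw [agzLoop, bMain]
    by_cases hi : zb.length < s.length
    · rw [if_pos hi, if_pos hi]
      rw [hbox]
      by_cases hr : r < zb.length
      · rw [if_pos hr, if_pos hr]
        have hv : azExt s zb.length (s.length - zb.length) zb.length 0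
            = bExt s zb.length zb.length (s.length - zb.length) 0 := by
          rw [bExt_eq_azExt, Nat.add_zero]
        rw [hv]
        set v := bExt s zb.length zb.length (s.length - zb.length) 0 with hvdef
        have hset := pad_set zb s.length v hi
        have hbox' : bBox (zb ++ [v]) (zb ++ [v]).length
            = (if v > 0 then (zb.length + v - 1, zb.length) else (r, l)) := by
          have hlen : (zb ++ [v]).length = zb.length + 1 := by simp
          rw [hlen, bBox_succ _ _ (by omega),
            bBox_congr (zb ++ [v]) zb zb.length (fun j hj => append_getD zb v j hj),
            hbox, append_getD_last]
          by_cases hv0 : v > 0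
          · rw [if_pos ⟨hv0, by omega⟩, if_pos hv0]
          · rw [if_neg (fun hc => absurd hc.1 (by omega)), if_neg hv0]
        by_cases hv0 : v > 0
        · rw [if_pos hv0]
          rw [hset]
          have := ih (zb ++ [v]) zb.length (zb.length + v - 1) (by simp; omega)
            (by simp) (by rw [hbox', if_pos hv0])
          simp only [List.length_append, List.length_cons, List.length_nil, Nat.zero_add] at this
          have e1 : v - 1 + zb.length = zb.length + v - 1 := by omega
          rw [e1]
          exact this
        · rw [if_neg hv0]
          rw [hset]
          have := ih (zb ++ [v]) l r (by simp; omega) (by simp)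
            (by rw [hbox', if_neg hv0])
          simp only [List.length_append, List.length_cons, List.length_nil, Nat.zero_add] at this
          exact this
      · rw [if_neg hr, if_neg hr]
        have hge : ∀ j, (zb ++ List.replicate (s.length - zb.length) 0).getD j 0 = zb.getD j 0 :=
          pad_getD zb _
        rw [hge]
        set w := zb.getD (zb.length - l) 0 with hwdef
        by_cases hc : w < r - zb.length
        · rw [if_pos hc, if_pos hc]
          rw [pad_set zb s.length w hi]
          have hbox' : bBox (zb ++ [w]) (zb ++ [w]).length = (r, l) := by
            have hlen : (zb ++ [w]).length = zb.length + 1 := by simp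
            rw [hlen, bBox_succ _ _ (by omega),
              bBox_congr (zb ++ [w]) zb zb.length (fun j hj => append_getD zb w j hj),
              hbox, append_getD_last]
            rw [if_neg (fun hcc => by omega)]
          have := ih (zb ++ [w]) l r (by simp; omega) (by simp) hbox'
          simp only [List.length_append, List.length_cons, List.length_nil, Nat.zero_add] at this
          exact this
        · rw [if_neg hc, if_neg hc]
          have hv : azExt s zb.length (s.length - (r + 1)) (r + 1) 0 + (r - zb.length + 1)
              = r - zb.length + 1 + bExt s zb.length (r + 1) (s.length - (r + 1)) 0 := by
            rw [bExt_eq_azExt, Nat.add_zero]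
            omega
          rw [hv]
          set v := r - zb.length + 1 + bExt s zb.length (r + 1) (s.length - (r + 1)) 0 with hvdef
          have hvpos : 0 < v := by omega
          have hrle : r ≤ zb.length + v - 1 := by omega
          show agzLoop s fuel ((zb ++ List.replicate (s.length - zb.length) 0).set zb.length v)
            zb.length (v - 1 + zb.length) (zb.length + 1) = bMain s fuel (zb ++ [v])
          rw [pad_set zb s.length v hi]
          have hbox' : bBox (zb ++ [v]) (zb ++ [v]).length = (zb.length + v - 1, zb.length) := by
            have hlen : (zb ++ [v]).length = zb.length + 1 := by simp
            rw [hlen, bBox_succ _ _ (by omega),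
              bBox_congr (zb ++ [v]) zb zb.length (fun j hj => append_getD zb v j hj),
              hbox, append_getD_last, if_pos ⟨hvpos, hrle⟩]
          have := ih (zb ++ [v]) zb.length (zb.length + v - 1) (by simp; omega)
            (by simp) hbox'
          simp only [List.length_append, List.length_cons, List.length_nil, Nat.zero_add] at this
          have e1 : v - 1 + zb.length = zb.length + v - 1 := by omega
          rw [e1]
          exact this
    · rw [if_neg hi, if_neg hi]
      have : s.length - zb.length = 0 := by omega
      simp [this]

-- entry: A's preallocated array + special i=1 block = B's growing loop from [n]
lemma gz_eq (s : List Char) : ∀ fuel, s.length ≤ fuel + 1 → 1 ≤ s.length →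
    agz s = bMain s (fuel + 1) [s.length] := by
  intro fuel hfuel hs
  unfold agz
  have hout0 : (List.replicate s.length (0:ℕ)).set 0 s.length
      = [s.length] ++ List.replicate (s.length - 1) 0 := by
    have h1 : s.length = (s.length - 1) + 1 := by omega
    conv_lhs => rw [h1, List.replicate_succ]
    simp
    all_goals omega
  by_cases hn : s.length < 2
  · rw [if_pos hn]
    rw [bMain, if_neg (by simp; omega), hout0]
    have : s.length - 1 = 0 := by omega
    simp [this]
  · rw [if_neg hn]
    -- B's first iteration (i = 1): bBox [n] 1 = (0,0), branch r < i, v = bExt s 1 1 _ 0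
    have hb1 : bBox [s.length] 1 = (0, 0) := by
      unfold bBox
      simp
    have hstepB : bMain s (fuel + 1) [s.length]
        = bMain s fuel ([s.length] ++ [bExt s 1 1 (s.length - 1) 0]) := by
      rw [bMain]
      rw [if_pos (by simp; omega)]
      simp only [List.length_cons, List.length_nil, hb1]
      norm_num
    have hv : azExt s 1 (s.length - 1) 1 0 = bExt s 1 1 (s.length - 1) 0 := by
      rw [bExt_eq_azExt, Nat.add_zero]
    rw [hstepB, hv]
    set v := bExt s 1 1 (s.length - 1) 0 with hvdef
    have hout1 : (((List.replicate s.length (0:ℕ)).set 0 s.length).set 1 v)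
        = ([s.length] ++ [v]) ++ List.replicate (s.length - 2) 0 := by
      rw [hout0]
      have := pad_set [s.length] s.length v (by simp; omega)
      simp only [List.length_cons, List.length_nil] at this
      exact this
    have hbox2 : bBox ([s.length] ++ [v]) ([s.length] ++ [v]).length
        = (if v > 0 then (v, 1) else (0, 0)) := by
      have hlen : ([s.length] ++ [v]).length = 2 := by simp
      rw [hlen, show (2:ℕ) = 1 + 1 from rfl, bBox_succ _ _ le_rfl,
        bBox_congr ([s.length] ++ [v]) [s.length] 1
          (fun j hj => append_getD [s.length] v j (by simpa using hj)), hb1]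
      have hg : ([s.length] ++ [v]).getD 1 0 = v := by
        have := append_getD_last [s.length] v
        simp only [List.length_cons, List.length_nil, Nat.zero_add] at this
        exact this
      rw [hg]
      by_cases hv0 : v > 0
      · rw [if_pos ⟨hv0, by omega⟩, if_pos hv0, show 1 + v - 1 = v from by omega]
      · rw [if_neg (fun hc => absurd hc.1 (by omega)), if_neg hv0]
    by_cases hv0 : v > 0
    · rw [if_pos hv0]
      have hm := main_eq s fuel ([s.length] ++ [v]) 1 v (by simp; omega) (by simp)
        (by rw [hbox2, if_pos hv0])
      simp only [List.length_append, List.length_cons, List.length_nil, Nat.zero_add] at hm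
      rw [hout1]
      have e2 : s.length - 2 = s.length - (1 + 1) := by omega
      rw [e2, show (2:ℕ) = 1 + 1 from rfl,
        agzLoop_congr s s.length fuel _ 1 v (1 + 1) (by omega) (by omega)]
      exact hm
    · rw [if_neg hv0]
      have hm := main_eq s fuel ([s.length] ++ [v]) 0 0 (by simp; omega) (by simp)
        (by rw [hbox2, if_neg hv0])
      simp only [List.length_append, List.length_cons, List.length_nil, Nat.zero_add] at hm
      rw [hout1]
      have e2 : s.length - 2 = s.length - (1 + 1) := by omega
      rw [e2, show (2:ℕ) = 1 + 1 from rfl,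
        agzLoop_congr s s.length fuel _ 0 0 (1 + 1) (by omega) (by omega)]
      exact hm

lemma scan_skip (z : List ℕ) (n : ℕ) : ∀ len a m, n ≤ a + m →
    (List.range' a len).foldl
      (fun mx i => if z.getD i 0 + i = n then max mx (z.getD i 0) else mx) m = m := by
  intro len
  induction len with
  | zero => intro a m _; rfl
  | succ len ih =>
    intro a m hm
    rw [List.range'_succ, List.foldl_cons]
    by_cases h : z.getD a 0 + a = n
    · simp only [if_pos h]
      rw [max_eq_left (by omega)]
      exact ih (a + 1) m (by omega)
    · simp only [if_neg h]
      exact ih (a + 1) m (by omega)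

lemma scan_eq (z : List ℕ) (n : ℕ) : ∀ len a fuel, a + len = n → len ≤ fuel →
    (List.range' a len).foldl
      (fun mx i => if z.getD i 0 + i = n then max mx (z.getD i 0) else mx) 0
      = bScan z n fuel a := by
  intro len
  induction len with
  | zero =>
    intro a fuel ha _
    cases fuel with
    | zero => rfl
    | succ fuel => rw [bScan, if_neg (by omega)]; rfl
  | succ len ih =>
    intro a fuel ha hlen
    cases fuel with
    | zero => omega
    | succ fuel =>
      rw [List.range'_succ, List.foldl_cons, bScan, if_pos (show a < n from by omega)]
      by_cases h : z.getD a 0 + a = n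
      · simp only [if_pos h]
        rw [max_eq_right (by omega)]
        rw [scan_skip z n len (a + 1) (z.getD a 0) (by omega)]
        omega
      · simp only [if_neg h]
        exact ih (a + 1) fuel (by omega) (by omega)

-- A = B on every input (both ports are total)
lemma ab_eq (T S : String) : question_7 T S = question_7_alt T S := by
  have hA : question_7 T S = ((List.range' (T.toList.length + 1)
      ((T.toList ++ '$' :: S.toList).length - (T.toList.length + 1))).foldl
      (fun mx i => if (agz (T.toList ++ '$' :: S.toList)).getD i 0 + i
          = (T.toList ++ '$' :: S.toList).length then
        max mx ((agz (T.toList ++ '$' :: S.toList)).getD i 0) else mx) 0 : ℕ) := rfl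
  have hB : question_7_alt T S = (bScan (bMain (T.toList ++ '$' :: S.toList)
      (T.toList ++ '$' :: S.toList).length [(T.toList ++ '$' :: S.toList).length])
      (T.toList ++ '$' :: S.toList).length
      (T.toList ++ '$' :: S.toList).length (T.toList.length + 1) : ℕ) := rfl
  have hlen1 : 1 ≤ (T.toList ++ '$' :: S.toList).length := by simp; omega
  obtain ⟨f, hf⟩ : ∃ f, (T.toList ++ '$' :: S.toList).length = f + 1 :=
    ⟨(T.toList ++ '$' :: S.toList).length - 1, by omega⟩
  have hg := gz_eq (T.toList ++ '$' :: S.toList) f (by omega) hlen1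
  rw [← hf] at hg
  rw [hA, hB, ← hg]
  refine congrArg _ (scan_eq _ _ _ _ _ ?_ ?_)
  · have : (T.toList ++ '$' :: S.toList).length
        = T.toList.length + 1 + S.toList.length := by simp; omega
    omega
  · omega

-- ===== VERDICT (by name: the statement is the Claim_ definition above) =====
theorem question_7_spec : Claim_equal_question_7 := by
  intro T S _
  exact ab_eq T S
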